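-- pv_equiv track=rewrite | github.com/Sungmin-Joo/Algorithm-competition | Programmers/완전탐색/숫자야구.py | solution
-- ===== SOURCE A (Python) =====
-- def solution(baseball):
--     answer = 0
--     for i in range(100,1000):
--         s = str(i)
--         if s[0] == s[1] or s[1] == s[2] or s[0] == s[2]:
--             continue
--         if s[0] == '0' or s[1] == '0' or s[2] == '0':
--             continue
--         t_flag = 1
--         for num, strike, ball in baseball:
--             num = str(num)
--             temp_strike = 0
--             temp_ball = 0
--
--             for j in range(3):
--                 if s[j] == num[j]:
--                     temp_strike += 1
--                 elif s[j] in num: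
--                     temp_ball += 1
--
--             if temp_strike != strike or temp_ball != ball:
--                 t_flag = 0
--                 break
--
--         if t_flag:
--             answer += 1
--
--     return answer
-- ===== SOURCE B (Python) =====
-- def solution(baseball):
--     candidates = {a + b + c
--                   for a in '123456789' for b in '123456789' for c in '123456789'
--                   if len({a, b, c}) == 3}
--     for clue in baseball:
--         if not candidates:
--             break
--         num, strike, ball = clue
--         num = str(num)
--         def ok(s):
--             hits = sum(s[j] == num[j] for j in range(3))
--             return hits == strike and len(set(s) & set(num)) - hits == ball
--         candidates = {s for s in candidates if ok(s)}
--     return len(candidates)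
-- ===== Notes on version B (the rewrite author's own statement) =====
-- stated objective: alternative
-- what changed: B inverts the loop nesting: it builds the pool of distinct-nonzero-digit candidates once as a set, then iterates over the CLUES, shrinking the pool by set-comprehension filtering (strike by a positional sum, ball by len(set(s)&set(num))-strike) with an early break once the pool is empty, and returns the size of the surviving pool, instead of A's scan of 100..999 checking each number against all clues with a per-candidate early break.
-- outside the precondition, e.g. on solution([[112, 3, 0], [5, 0, 0]]): A returns 0, B returns 0
import Mathlib
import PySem

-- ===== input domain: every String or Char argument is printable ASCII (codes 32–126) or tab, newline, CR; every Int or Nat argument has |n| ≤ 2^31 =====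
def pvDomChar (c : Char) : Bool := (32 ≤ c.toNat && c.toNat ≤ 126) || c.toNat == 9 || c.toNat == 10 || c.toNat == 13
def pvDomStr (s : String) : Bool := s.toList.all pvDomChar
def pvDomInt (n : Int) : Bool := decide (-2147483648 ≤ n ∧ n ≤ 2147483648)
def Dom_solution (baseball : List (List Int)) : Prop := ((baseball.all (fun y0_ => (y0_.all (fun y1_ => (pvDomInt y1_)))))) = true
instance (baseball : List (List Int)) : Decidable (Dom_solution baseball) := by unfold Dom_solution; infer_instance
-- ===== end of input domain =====

-- B inverts A's loop nesting: instead of scanning 100..999 candidate-by-candidate and breaking on the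
-- first failing clue, B builds the pool of distinct-nonzero-digit candidates once and then iterates over
-- the CLUES, shrinking the pool by set-comprehension filtering (with the set-intersection ball formula);
-- objective: alternative (same fixed candidate space, different traversal).

-- ===== PORT A =====
-- one clue check: A's inner 'for j in range(3)' loop with the strike/elif-ball counters
def pvClueA (s : List Char) (c : List Int) : Bool :=
  let num := (PySem.Int.toStr (PySem.List.pyGetD c 0 0)).toList
  let p := (PySem.List.pyRange 0 3 1).foldl (fun (p : Int × Int) j =>
      if PySem.List.pyGetD s j ' ' = PySem.List.pyGetD num j ' ' then (p.1 + 1, p.2)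
      else if PySem.Chars.isIn [PySem.List.pyGetD s j ' '] num then (p.1, p.2 + 1)
      else p) (0, 0)
  decide (p.1 = PySem.List.pyGetD c 1 0) && decide (p.2 = PySem.List.pyGetD c 2 0)

def solution (baseball : List (List Int)) : Int :=
  (PySem.List.pyRange 100 1000 1).foldl (fun answer i =>
    let s := (PySem.Int.toStr i).toList
    let g := fun (j : Int) => PySem.List.pyGetD s j ' '
    if g 0 = g 1 ∨ g 1 = g 2 ∨ g 0 = g 2 then answer
    else if g 0 = '0' ∨ g 1 = '0' ∨ g 2 = '0' then answer
    else if baseball.all (fun c => pvClueA s c) then answer + 1 else answer) 0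

-- ===== PORT B =====
-- B's ok(s) for one clue: hits by a range(3) sum, ball by set intersection minus hits
def pvClueB (c : List Int) (s : List Char) : Bool :=
  let num := (PySem.Int.toStr (PySem.List.pyGetD c 0 0)).toList
  let hits : Int := (PySem.List.pyRange 0 3 1).foldl (fun acc j =>
      acc + (if PySem.List.pyGetD s j ' ' = PySem.List.pyGetD num j ' ' then 1 else 0)) 0
  decide (hits = PySem.List.pyGetD c 1 0) &&
    decide ((PySem.Set.len (PySem.Set.inter (PySem.Set.ofList s) (PySem.Set.ofList num)) : Int) - hits = PySem.List.pyGetD c 2 0)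

-- B's initial candidate set comprehension over '123456789'³ with len({a,b,c})==3
def pvCandsB : List (List Char) :=
  PySem.Set.ofList ("123456789".toList.flatMap (fun a =>
    "123456789".toList.flatMap (fun b =>
      "123456789".toList.filterMap (fun d =>
        if PySem.Set.len (PySem.Set.ofList [a, b, d]) = 3 then some [a, b, d] else none))))

-- B's clue loop with its early exit ('if not candidates: break'); Python's break leaves the pool
-- unchanged for the remaining clues, which the guarded fold reproduces exactly (an empty pool stays empty)
def solution_alt (baseball : List (List Int)) : Int :=
  ((baseball.foldl (fun cs c => if cs.isEmpty then cs else cs.filter (fun s => pvClueB c s)) pvCandsB).length : Int)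

-- ===== PRECONDITION & SPEC =====
-- Pre_ excludes exactly the inputs on which A raises (a clue list of length ≠ 3 raises ValueError on
-- unpacking, a clue number whose str() is shorter than 3 raises IndexError at num[j]) — except that a
-- malformed clue is harmless (and admitted) when the FIRST clue is well-formed but arithmetically
-- unsatisfiable (negative strike or ball, or strike + ball > 3): then A breaks at clue 1 for every
-- candidate and returns without ever reading the rest.  Pre_ is narrower than A's exact domain on
-- inputs where a malformed later clue is shielded only by the semantic unsatisfiability of a
-- well-formed-looking earlier clue (e.g. [[112, 3, 0], [5, 0, 0]]); both programs agree there too.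
def Pre_solution (baseball : List (List Int)) : Prop :=
  ∀ c₀ ∈ baseball.take 1,
    (c₀.length = 3 ∧ 3 ≤ (PySem.Int.toStr (PySem.List.pyGetD c₀ 0 0)).toList.length) ∧
      ((PySem.List.pyGetD c₀ 1 0 < 0 ∨ PySem.List.pyGetD c₀ 2 0 < 0 ∨
          3 < PySem.List.pyGetD c₀ 1 0 + PySem.List.pyGetD c₀ 2 0) ∨
        ∀ c ∈ baseball, c.length = 3 ∧ 3 ≤ (PySem.Int.toStr (PySem.List.pyGetD c 0 0)).toList.length)
instance (baseball : List (List Int)) : Decidable (Pre_solution baseball) := by unfold Pre_solution; infer_instance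

def pvWitness_solution : List (List Int) := [[123, 1, 1]]

def Spec_solution (baseball : List (List Int)) (out : Int) : Prop := out = solution_alt baseball
instance (baseball : List (List Int)) (out : Int) : Decidable (Spec_solution baseball out) := by unfold Spec_solution; infer_instance

-- ===== CLAIM (what is proved, stated in full; the proofs are below) =====
def Claim_equal_solution : Prop := ∀ (baseball : List (List Int)), Dom_solution baseball → Pre_solution baseball → Spec_solution baseball (solution baseball)

-- ===== LEMMAS AND PROOFS =====

-- the candidate generator of A: str(i) for i whose digits are pairwise distinct and nonzero
def pvGA (i : Int) : Option (List Char) :=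
  let s := (PySem.Int.toStr i).toList
  let g := fun (j : Int) => PySem.List.pyGetD s j ' '
  if g 0 = g 1 ∨ g 1 = g 2 ∨ g 0 = g 2 then none
  else if g 0 = '0' ∨ g 1 = '0' ∨ g 2 = '0' then none
  else some s

def pvLA : List (List Char) := (PySem.List.pyRange 100 1000 1).filterMap pvGA

def pvDigits : List Char := "123456789".toList

def pvGB (a b d : Char) : Option (List Char) :=
  if PySem.Set.len (PySem.Set.ofList [a, b, d]) = 3 then some [a, b, d] else none

def pvLB : List (List Char) :=
  pvDigits.flatMap (fun a => pvDigits.flatMap (fun b => pvDigits.filterMap (pvGB a b)))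

set_option maxRecDepth 40000 in
theorem pvLA_eq_LB : pvLA = pvLB := by decide

set_option maxRecDepth 40000 in
set_option maxHeartbeats 2000000 in
theorem pvCandsB_eq_LB : pvCandsB = pvLB := by decide

set_option maxRecDepth 40000 in
theorem pvLB_shape : pvLB.all (fun s => s.length == 3 && s.Nodup) = true := by decide

-- counting loop over an option generator (A's scan with skips counts the generated candidates)
theorem pv_foldl_filterMap_count {α β : Type} (l : List α) (g : α → Option β) (q : β → Bool) (acc : Int) :
    l.foldl (fun acc x => (g x).elim acc (fun s => if q s then acc + 1 else acc)) acc
      = acc + ((l.filterMap g).countP q : Int) := by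
  induction l generalizing acc with
  | nil => simp
  | cons x t ih =>
    simp only [List.foldl_cons, List.filterMap_cons]
    cases hg : g x with
    | none => simp [hg, ih]
    | some s =>
      rcases Bool.eq_false_or_eq_true (q s) with hq | hq <;>
        simp [hg, hq, ih, List.countP_cons] <;> push_cast <;> ring

def pvQ (baseball : List (List Int)) : List Char → Bool := fun s =>
  baseball.all (fun c => pvClueB c s)

-- B's clue loop: repeatedly filtering the pool leaves exactly the candidates passing all clues
theorem pv_foldl_filter_length {α : Type} (clues : List (List Int)) (f : List Int → α → Bool)
    (l : List α) :
    (clues.foldl (fun cs c => cs.filter (fun s => f c s)) l).length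
      = l.countP (fun s => clues.all (fun c => f c s)) := by
  induction clues generalizing l with
  | nil => simp
  | cons c t ih =>
    simp only [List.foldl_cons, ih, List.countP_filter, List.all_cons]
    congr 1
    funext s
    exact Bool.and_comm _ _
theorem pv_all_congr {α : Type} (l : List α) (p q : α → Bool) (h : ∀ x ∈ l, p x = q x) :
    l.all p = l.all q := by
  induction l with
  | nil => rfl
  | cons x t ih =>
    simp only [List.all_cons, h x (List.mem_cons_self), ih (fun y hy => h y (List.mem_cons_of_mem x hy))]

theorem solution_eq_count (baseball : List (List Int)) :
    solution baseball = (pvLA.countP (fun s => baseball.all (fun c => pvClueA s c)) : Int) := by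
  have hbody : (fun (answer : Int) (i : Int) =>
      let s := (PySem.Int.toStr i).toList
      let g := fun (j : Int) => PySem.List.pyGetD s j ' '
      if g 0 = g 1 ∨ g 1 = g 2 ∨ g 0 = g 2 then answer
      else if g 0 = '0' ∨ g 1 = '0' ∨ g 2 = '0' then answer
      else if baseball.all (fun c => pvClueA s c) then answer + 1 else answer)
    = (fun (answer : Int) (i : Int) =>
        (pvGA i).elim answer (fun s => if baseball.all (fun c => pvClueA s c) then answer + 1 else answer)) := by
    funext answer i
    simp only [pvGA]
    split_ifs <;> simp only [Option.elim_none, Option.elim_some, *, eq_self_iff_true, if_true, if_false, Bool.false_eq_true, add_zero]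
  unfold solution pvLA
  rw [hbody, pv_foldl_filterMap_count]
  exact zero_add _

-- the empty-pool guard is the identity: filtering an empty list is the empty list
theorem pv_guard_eq {α : Type} (f : List Int → α → Bool) :
    (fun (cs : List α) (c : List Int) => if cs.isEmpty then cs else cs.filter (fun s => f c s))
      = (fun cs c => cs.filter (fun s => f c s)) := by
  funext cs c
  cases cs <;> rfl

theorem solution_alt_eq_count (baseball : List (List Int)) :
    solution_alt baseball = (pvLB.countP (pvQ baseball) : Int) := by
  unfold solution_alt
  rw [pv_guard_eq pvClueB, pvCandsB_eq_LB, pv_foldl_filter_length]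
  rfl

set_option maxHeartbeats 1000000 in
theorem pvClue_equiv (s : List Char) (hs : s.length = 3) (hnd : s.Nodup) (c : List Int)
    (hn : 3 ≤ (PySem.Int.toStr (PySem.List.pyGetD c 0 0)).toList.length) :
    pvClueA s c = pvClueB c s := by
  obtain ⟨x, y, z, rfl⟩ : ∃ a b c', s = [a, b, c'] := by
    rcases s with _ | ⟨a, _ | ⟨b, _ | ⟨c', _ | ⟨d, t⟩⟩⟩⟩
    all_goals first | exact ⟨_, _, _, rfl⟩ | simp_all
  simp only [pvClueA, pvClueB]
  generalize (PySem.Int.toStr (PySem.List.pyGetD c 0 0)).toList = n at hn ⊢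
  obtain ⟨n0, n1, n2, r, rfl⟩ : ∃ a b c' t, n = a :: b :: c' :: t := by
    rcases n with _ | ⟨a, _ | ⟨b, _ | ⟨c', t⟩⟩⟩
    all_goals first | exact ⟨_, _, _, _, rfl⟩ | simp_all
  rw [show PySem.List.pyRange 0 3 1 = [0, 1, 2] from by decide]
  have key : ∀ (p : Int × Int) (j : Int),
      (if PySem.List.pyGetD [x, y, z] j ' ' = PySem.List.pyGetD (n0 :: n1 :: n2 :: r) j ' ' then (p.1 + 1, p.2)
       else if PySem.Chars.isIn [PySem.List.pyGetD [x, y, z] j ' '] (n0 :: n1 :: n2 :: r) then (p.1, p.2 + 1)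
       else p)
      = (p.1 + (if PySem.List.pyGetD [x, y, z] j ' ' = PySem.List.pyGetD (n0 :: n1 :: n2 :: r) j ' ' then 1 else 0),
         p.2 + (if PySem.List.pyGetD [x, y, z] j ' ' ≠ PySem.List.pyGetD (n0 :: n1 :: n2 :: r) j ' '
                  ∧ PySem.Chars.isIn [PySem.List.pyGetD [x, y, z] j ' '] (n0 :: n1 :: n2 :: r) then 1 else 0)) := by
    intro p j
    split_ifs <;> simp_all
  simp only [List.foldl_cons, List.foldl_nil, key]
  have gs0 : PySem.List.pyGetD [x, y, z] (0 : Int) ' ' = x := rfl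
  have gs1 : PySem.List.pyGetD [x, y, z] (1 : Int) ' ' = y := rfl
  have gs2 : PySem.List.pyGetD [x, y, z] (2 : Int) ' ' = z := rfl
  have gn0 : PySem.List.pyGetD (n0 :: n1 :: n2 :: r) (0 : Int) ' ' = n0 := by
    simp [PySem.List.pyGetD_ofNat']
  have gn1 : PySem.List.pyGetD (n0 :: n1 :: n2 :: r) (1 : Int) ' ' = n1 := by
    simp [PySem.List.pyGetD_ofNat']
  have gn2 : PySem.List.pyGetD (n0 :: n1 :: n2 :: r) (2 : Int) ' ' = n2 := by
    simp [PySem.List.pyGetD_ofNat']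
  simp only [gs0, gs1, gs2, gn0, gn1, gn2]
  simp only [PySem.Chars.isIn_iff_infix, List.singleton_infix_iff]
  have hfs : PySem.Set.ofList [x, y, z] = [x, y, z] := PySem.Set.ofList_eq_self_of_nodup _ hnd
  simp only [hfs]
  simp only [PySem.Set.inter, PySem.Set.len, PySem.Set.contains_eq_listContains,
    List.filter_cons, List.filter_nil, List.elem_eq_mem, PySem.Set.mem_ofList, decide_eq_true_eq]
  generalize PySem.List.pyGetD c 1 0 = c1
  generalize PySem.List.pyGetD c 2 0 = c2
  have e2 : ((((if x ∈ n0 :: n1 :: n2 :: r then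
                  x :: (if y ∈ n0 :: n1 :: n2 :: r then y :: (if z ∈ n0 :: n1 :: n2 :: r then [z] else [])
                        else (if z ∈ n0 :: n1 :: n2 :: r then [z] else []))
                else (if y ∈ n0 :: n1 :: n2 :: r then y :: (if z ∈ n0 :: n1 :: n2 :: r then [z] else [])
                      else (if z ∈ n0 :: n1 :: n2 :: r then [z] else []))).length : Nat) : Int))
      = ((0 : Int) + (if x = n0 then 1 else 0) + (if y = n1 then 1 else 0) + (if z = n2 then 1 else 0))
        + ((0 : Int) + (if x ≠ n0 ∧ x ∈ n0 :: n1 :: n2 :: r then 1 else 0)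
            + (if y ≠ n1 ∧ y ∈ n0 :: n1 :: n2 :: r then 1 else 0)
            + (if z ≠ n2 ∧ z ∈ n0 :: n1 :: n2 :: r then 1 else 0)) := by
    clear key gs0 gs1 gs2 gn0 gn1 gn2 hfs hs hn hnd
    split_ifs <;> simp_all
  simp only [e2, add_sub_cancel_left]

-- an arithmetically unsatisfiable clue (negative strike/ball, or their sum above 3) rejects every candidate
set_option maxHeartbeats 1000000 in
theorem pvClueA_false (s : List Char) (hs : s.length = 3) (c : List Int)
    (hn : 3 ≤ (PySem.Int.toStr (PySem.List.pyGetD c 0 0)).toList.length)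
    (hinf : PySem.List.pyGetD c 1 0 < 0 ∨ PySem.List.pyGetD c 2 0 < 0 ∨
      3 < PySem.List.pyGetD c 1 0 + PySem.List.pyGetD c 2 0) :
    pvClueA s c = false := by
  obtain ⟨x, y, z, rfl⟩ : ∃ a b c', s = [a, b, c'] := by
    rcases s with _ | ⟨a, _ | ⟨b, _ | ⟨c', _ | ⟨d, t⟩⟩⟩⟩
    all_goals first | exact ⟨_, _, _, rfl⟩ | simp_all
  simp only [pvClueA]
  generalize (PySem.Int.toStr (PySem.List.pyGetD c 0 0)).toList = n at hn ⊢
  obtain ⟨n0, n1, n2, r, rfl⟩ : ∃ a b c' t, n = a :: b :: c' :: t := by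
    rcases n with _ | ⟨a, _ | ⟨b, _ | ⟨c', t⟩⟩⟩
    all_goals first | exact ⟨_, _, _, _, rfl⟩ | simp_all
  rw [show PySem.List.pyRange 0 3 1 = [0, 1, 2] from by decide]
  have key : ∀ (p : Int × Int) (j : Int),
      (if PySem.List.pyGetD [x, y, z] j ' ' = PySem.List.pyGetD (n0 :: n1 :: n2 :: r) j ' ' then (p.1 + 1, p.2)
       else if PySem.Chars.isIn [PySem.List.pyGetD [x, y, z] j ' '] (n0 :: n1 :: n2 :: r) then (p.1, p.2 + 1)
       else p)
      = (p.1 + (if PySem.List.pyGetD [x, y, z] j ' ' = PySem.List.pyGetD (n0 :: n1 :: n2 :: r) j ' ' then 1 else 0),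
         p.2 + (if PySem.List.pyGetD [x, y, z] j ' ' ≠ PySem.List.pyGetD (n0 :: n1 :: n2 :: r) j ' '
                  ∧ PySem.Chars.isIn [PySem.List.pyGetD [x, y, z] j ' '] (n0 :: n1 :: n2 :: r) then 1 else 0)) := by
    intro p j
    split_ifs <;> simp_all
  simp only [List.foldl_cons, List.foldl_nil, key]
  generalize PySem.List.pyGetD c 1 0 = c1 at hinf ⊢
  generalize PySem.List.pyGetD c 2 0 = c2 at hinf ⊢
  clear key hn hs
  simp only [Bool.and_eq_false_iff, decide_eq_false_iff_not]
  rcases hinf with h | h | h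
  · left
    intro he
    split_ifs at he <;> first | omega | tauto
  · right
    intro he
    split_ifs at he <;> first | omega | tauto
  · by_cases hts : ((0 : Int) + (if PySem.List.pyGetD [x, y, z] 0 ' ' = PySem.List.pyGetD (n0 :: n1 :: n2 :: r) 0 ' ' then 1 else 0)
        + (if PySem.List.pyGetD [x, y, z] 1 ' ' = PySem.List.pyGetD (n0 :: n1 :: n2 :: r) 1 ' ' then 1 else 0)
        + (if PySem.List.pyGetD [x, y, z] 2 ' ' = PySem.List.pyGetD (n0 :: n1 :: n2 :: r) 2 ' ' then 1 else 0)) = c1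
    · right
      intro he
      split_ifs at hts he <;> first | omega | tauto
    · left
      exact hts

-- ===== VERDICT (by name: the statement is the Claim_ definition above) =====
set_option maxHeartbeats 4000000 in
theorem solution_spec : Claim_equal_solution := by
  intro baseball _ hpre
  unfold Spec_solution
  rw [solution_eq_count, solution_alt_eq_count, pvLA_eq_LB]
  rcases baseball with _ | ⟨c₀, rest⟩
  · congr 1
  · obtain ⟨hwf, hbr⟩ := hpre c₀ (by simp)
    rcases hbr with hinf | hall
    · have h1 : pvLB.countP (fun s => (c₀ :: rest).all (fun c => pvClueA s c)) = 0 := by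
        apply List.countP_eq_zero.mpr
        intro s hsmem
        have hsh := List.all_eq_true.mp pvLB_shape s hsmem
        simp only [Bool.and_eq_true, beq_iff_eq, decide_eq_true_eq] at hsh
        simp only [List.all_cons, pvClueA_false s hsh.1 c₀ hwf.2 hinf, Bool.false_and]
        exact Bool.false_ne_true
      have h2 : pvLB.countP (pvQ (c₀ :: rest)) = 0 := by
        apply List.countP_eq_zero.mpr
        intro s hsmem
        have hsh := List.all_eq_true.mp pvLB_shape s hsmem
        simp only [Bool.and_eq_true, beq_iff_eq, decide_eq_true_eq] at hsh
        have hf : pvClueB c₀ s = false := by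
          rw [← pvClue_equiv s hsh.1 hsh.2 c₀ hwf.2]
          exact pvClueA_false s hsh.1 c₀ hwf.2 hinf
        simp only [pvQ, List.all_cons, hf, Bool.false_and]
        exact Bool.false_ne_true
      rw [h1, h2]
    · congr 1
      apply List.countP_congr
      intro s hsmem
      have hsh := List.all_eq_true.mp pvLB_shape s hsmem
      simp only [Bool.and_eq_true, beq_iff_eq, decide_eq_true_eq] at hsh
      have heq : ((c₀ :: rest).all fun c => pvClueA s c) = pvQ (c₀ :: rest) s := by
        unfold pvQ
        exact pv_all_congr _ _ _ (fun c hc => pvClue_equiv s hsh.1 hsh.2 c (hall c hc).2)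
      rw [heq]
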